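-- pv_equiv track=rewrite | github.com/pypi-data/pypi-mirror-303 | packages/fluid-sbom/fluid_sbom-1.1.4.tar.gz/fluid_sbom-1.1.4/fluid_sbom/pkg/cataloger/dotnet/parse_dotnet_portable_executable.py | extract_version
-- ===== SOURCE A (Python) =====
-- def contains_number(string: str) -> bool:
--     return any(char.isdigit() for char in string)
--
-- def extract_version(version: str) -> str:
--     # Trim leading and trailing whitespace
--     version = version.strip()
--
--     out = ""
--
--     # Split the version string into fields and iterate over them
--     for index, char in enumerate(version.split()):
--         # If the output already has a number but the current segment does not,
--         # return the output
--         if contains_number(out) and not contains_number(char):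
--             return out
--
--         # Append the current field to the output
--         if index == 0:
--             out = char
--         else:
--             out += " " + char
--
--     return out
-- ===== SOURCE B (Python) =====
-- def contains_number(string: str) -> bool:
--     return any(char.isdigit() for char in string)
--
--
-- def extract_version(version: str) -> str:
--     words = version.strip().split()
--     # phase 1: locate the first word that contains a digit
--     fd = next((i for i, w in enumerate(words) if contains_number(w)), None)
--     if fd is None:
--         return " ".join(words)
--     # phase 2: first digit-free word after it marks the cut point
--     rest = words[fd + 1:]
--     k = next((k for k, w in enumerate(rest) if not contains_number(w)), None)
--     if k is None:
--         return " ".join(words)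
--     return " ".join(words[:fd + 1 + k])
-- ===== Notes on version B (the rewrite author's own statement) =====
-- stated objective: simpler
-- what changed: Replaces A's accumulate-string-and-early-return loop by a two-phase index search on the word list (first word containing a digit, then first digit-free word after it) followed by a single slice-and-join.
import Mathlib
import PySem

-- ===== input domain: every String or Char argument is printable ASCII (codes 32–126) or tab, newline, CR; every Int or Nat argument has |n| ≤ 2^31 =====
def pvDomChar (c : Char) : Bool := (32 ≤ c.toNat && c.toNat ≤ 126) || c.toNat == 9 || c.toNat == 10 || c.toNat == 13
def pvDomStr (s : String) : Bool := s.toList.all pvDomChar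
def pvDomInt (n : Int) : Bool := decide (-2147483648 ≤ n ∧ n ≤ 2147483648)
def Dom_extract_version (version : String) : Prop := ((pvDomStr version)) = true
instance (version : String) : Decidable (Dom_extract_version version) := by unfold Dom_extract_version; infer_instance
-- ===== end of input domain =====

-- B replaces A's accumulate-and-early-return loop by a two-phase index search over the word
-- list (first word with a digit, then first digit-free word after it) — objective: simpler.

-- ===== PORT A =====
-- contains_number(string) = any(char.isdigit() for char in string)
def pvHasDigit (cs : List Char) : Bool := cs.any PySem.Chars.isdigit

-- the for-loop over enumerate(version.split()) with its early return
def pvALoop : List (Int × List Char) → List Char → List Char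
  | [], out => out
  | (i, w) :: rest, out =>
    if pvHasDigit out && !pvHasDigit w then out
    else pvALoop rest (if i == 0 then w else out ++ [' '] ++ w)

def extract_version (version : String) : String :=
  String.ofList (pvALoop (PySem.List.enumerate (PySem.Chars.split₀ (PySem.Chars.strip version.toList))) [])

-- ===== PORT B =====
def extract_version_alt (version : String) : String :=
  let words := PySem.Chars.split₀ (PySem.Chars.strip version.toList)
  -- next((i for i, w in enumerate(words) if contains_number(w)), None)
  match words.findIdx? (fun w => pvHasDigit w) with
  | none => String.ofList (PySem.Chars.join [' '] words)
  | some fd =>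
    -- rest = words[fd+1:]  (fd+1 ≥ 0, so the slice is a drop)
    let rest := words.drop (fd + 1)
    match rest.findIdx? (fun w => !pvHasDigit w) with
    | none => String.ofList (PySem.Chars.join [' '] words)
    | some k =>
      -- words[:fd+1+k]  (nonnegative bound, so the slice is a take)
      String.ofList (PySem.Chars.join [' '] (words.take (fd + 1 + k)))

-- ===== PRECONDITION & SPEC =====
def Spec_extract_version (version : String) (out : String) : Prop := out = extract_version_alt version
instance (version : String) (out : String) : Decidable (Spec_extract_version version out) := by unfold Spec_extract_version; infer_instance

-- ===== CLAIM (what is proved, stated in full; the proofs are below) =====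
def Claim_equal_extract_version : Prop := ∀ (version : String), Dom_extract_version version → Spec_extract_version version (extract_version version)

-- ===== LEMMAS AND PROOFS =====

-- what A's loop appends for each word after the first
def pvJoinTail (ws : List (List Char)) : List Char := ws.flatMap (fun w => ' ' :: w)

theorem pvIsdigit_space : PySem.Chars.isdigit ' ' = false := rfl

theorem pvHasDigit_append (out w : List Char) :
    pvHasDigit (out ++ [' '] ++ w) = (pvHasDigit out || pvHasDigit w) := by
  simp [pvHasDigit, pvIsdigit_space]

theorem pvJoin_cons (w : List Char) (l : List (List Char)) :
    PySem.Chars.join [' '] (w :: l) = w ++ pvJoinTail l := by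
  induction l generalizing w <;> simp_all [PySem.Chars.join, List.intercalate, pvJoinTail]

-- A's loop once the accumulator already contains a digit: it stops at the first
-- digit-free word, otherwise appends everything.
theorem pvALoop_hasD (ws : List (List Char)) (i : Int) (out : List Char)
    (hi : 1 ≤ i) (hd : pvHasDigit out = true) :
    pvALoop (PySem.List.enumerate ws i) out =
      match ws.findIdx? (fun w => !pvHasDigit w) with
      | none => out ++ pvJoinTail ws
      | some k => out ++ pvJoinTail (ws.take k) := by
  induction ws generalizing i out with
  | nil => simp [PySem.List.enumerate, pvALoop, pvJoinTail]
  | cons w ws ih =>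
    have hcons : PySem.List.enumerate (w :: ws) i = (i, w) :: PySem.List.enumerate ws (i + 1) := by
      simp [PySem.List.enumerate]
    have hiz : (i == 0) = false := by simp; omega
    rw [hcons]
    by_cases hw : pvHasDigit w
    · have : pvHasDigit (out ++ [' '] ++ w) = true := by rw [pvHasDigit_append, hd]; simp
      rw [pvALoop, hd, hw]
      simp only [Bool.not_true, Bool.and_false, if_false, hiz, Bool.false_eq_true, if_false]
      rw [ih (i + 1) _ (by omega) this, List.findIdx?_cons, hw]
      simp only [Bool.not_true, if_false, Bool.false_eq_true]
      cases h : ws.findIdx? (fun w => !pvHasDigit w) with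
      | none => simp [pvJoinTail]
      | some k =>
        have hk : 1 + k = k + 1 := Nat.add_comm 1 k
        simp [pvJoinTail]
    · rw [pvALoop, hd, List.findIdx?_cons]
      simp [hw, pvJoinTail]

-- A's loop while the accumulator is still digit-free: it appends words up to and
-- including the first word containing a digit, then behaves as pvALoop_hasD.
theorem pvALoop_noD (ws : List (List Char)) (i : Int) (out : List Char)
    (hi : 1 ≤ i) (hd : pvHasDigit out = false) :
    pvALoop (PySem.List.enumerate ws i) out =
      match ws.findIdx? (fun w => pvHasDigit w) with
      | none => out ++ pvJoinTail ws
      | some fd =>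
        match (ws.drop (fd + 1)).findIdx? (fun w => !pvHasDigit w) with
        | none => out ++ pvJoinTail ws
        | some k => out ++ pvJoinTail (ws.take (fd + 1 + k)) := by
  induction ws generalizing i out with
  | nil => simp [PySem.List.enumerate, pvALoop, pvJoinTail]
  | cons w ws ih =>
    have hcons : PySem.List.enumerate (w :: ws) i = (i, w) :: PySem.List.enumerate ws (i + 1) := by
      simp [PySem.List.enumerate]
    have hiz : (i == 0) = false := by simp; omega
    rw [hcons, pvALoop, hd]
    simp only [Bool.false_and, Bool.false_eq_true, if_false, hiz]
    cases hw : pvHasDigit w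
    case true =>
      have hdw : pvHasDigit (out ++ [' '] ++ w) = true := by rw [pvHasDigit_append, hd, hw]; rfl
      rw [pvALoop_hasD ws (i + 1) _ (by omega) hdw, List.findIdx?_cons, hw]
      simp only [if_true]
      cases h : ws.findIdx? (fun w => !pvHasDigit w) with
      | none => simp [h, pvJoinTail]
      | some k =>
        have hk : 1 + k = k + 1 := Nat.add_comm 1 k
        simp [h, hk, pvJoinTail]
    case false =>
      have hdw : pvHasDigit (out ++ [' '] ++ w) = false := by rw [pvHasDigit_append, hd, hw]; rfl
      rw [ih (i + 1) _ (by omega) hdw, List.findIdx?_cons, hw]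
      simp only [Bool.false_eq_true, if_false]
      cases h : ws.findIdx? (fun w => pvHasDigit w) with
      | none => simp [pvJoinTail, List.flatMap_cons]
      | some fd =>
        simp only [Option.map_some]
        cases h2 : (ws.drop (fd + 1)).findIdx? (fun w => !pvHasDigit w) with
        | none => simp [List.drop_succ_cons, h2, pvJoinTail, List.flatMap_cons]
        | some k =>
          have : fd + 1 + 1 + k = (fd + 1 + k) + 1 := by omega
          simp [List.drop_succ_cons, h2, this, pvJoinTail, List.flatMap_cons]

-- ===== VERDICT (by name: the statement is the Claim_ definition above) =====
theorem extract_version_spec : Claim_equal_extract_version := by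
  intro version _
  unfold Spec_extract_version extract_version extract_version_alt
  cases hws : PySem.Chars.split₀ (PySem.Chars.strip version.toList) with
  | nil => simp [PySem.List.enumerate, pvALoop, PySem.Chars.join, List.intercalate]
  | cons w ws =>
    dsimp only
    have hcons : PySem.List.enumerate (w :: ws) 0 = (0, w) :: PySem.List.enumerate ws 1 := by
      simp [PySem.List.enumerate]
    have hstep : pvALoop (PySem.List.enumerate (w :: ws) 0) [] = pvALoop (PySem.List.enumerate ws 1) w := by
      rw [hcons, pvALoop]; simp [pvHasDigit]
    rw [hstep]
    cases hw : pvHasDigit w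
    case true =>
      rw [pvALoop_hasD ws 1 w le_rfl hw, List.findIdx?_cons, hw]
      simp only [if_true, List.drop_succ_cons, List.drop_zero, Nat.zero_add]
      cases h : ws.findIdx? (fun w => !pvHasDigit w) with
      | none => simp [pvJoin_cons]
      | some k =>
        have hk : 1 + k = k + 1 := Nat.add_comm 1 k
        simp [hk, pvJoin_cons]
    case false =>
      rw [pvALoop_noD ws 1 w le_rfl hw, List.findIdx?_cons, hw]
      simp only [Bool.false_eq_true, if_false]
      cases h : ws.findIdx? (fun w => pvHasDigit w) with
      | none => simp [pvJoin_cons]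
      | some fd =>
        simp only [Option.map_some, List.drop_succ_cons]
        cases h2 : (ws.drop (fd + 1)).findIdx? (fun w => !pvHasDigit w) with
        | none => simp [pvJoin_cons]
        | some k =>
          have hk : fd + 1 + 1 + k = (fd + 1 + k) + 1 := by omega
          simp [hk, pvJoin_cons]
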